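-- pv_equiv track=rewrite | github.com/PennyQ/dataspot | dataspot/network/hierarchy/hierarchy_helper.py | list_levels_old
-- ===== SOURCE A (Python) =====
-- def list_levels_old(levels_dict):
--     levels = list()
--     inv_map = {v: k for k, v in levels_dict.items()}
--     for key in inv_map:
--         if key not in levels:
--             levels.append(key)
--     levels.sort()
--
--     return levels
-- ===== SOURCE B (Python) =====
-- def list_levels_old(levels_dict):
--     # Sort the (possibly duplicated) values first, then drop adjacent
--     # duplicates in one linear pass: on a sorted list this yields the
--     # sorted distinct values.
--     ordered = sorted(levels_dict.values())
--     result = []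
--     for v in ordered:
--         if not result or result[-1] != v:
--             result.append(v)
--     return result
-- ===== Notes on version B (the rewrite author's own statement) =====
-- stated objective: alternative
-- what changed: B sorts the raw values first (duplicates kept) and removes adjacent duplicates recursively, instead of A's hash-based deduplication via an inverted dict plus a membership-scan list followed by a sort.
import Mathlib
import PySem

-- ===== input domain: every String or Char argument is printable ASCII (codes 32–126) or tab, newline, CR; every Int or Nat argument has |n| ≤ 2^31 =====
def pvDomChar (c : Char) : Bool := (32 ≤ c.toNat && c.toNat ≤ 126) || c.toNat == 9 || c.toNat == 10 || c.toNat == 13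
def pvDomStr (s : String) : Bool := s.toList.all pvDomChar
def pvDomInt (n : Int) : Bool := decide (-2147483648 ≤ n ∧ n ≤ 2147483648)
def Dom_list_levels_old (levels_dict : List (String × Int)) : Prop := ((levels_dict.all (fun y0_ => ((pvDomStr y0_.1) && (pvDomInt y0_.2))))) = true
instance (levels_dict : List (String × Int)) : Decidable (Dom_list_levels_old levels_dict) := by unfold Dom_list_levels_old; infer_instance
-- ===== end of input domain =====

-- B replaces A's inverted-dict + membership-scan deduplication by sort-first then one adjacent-duplicate-dropping pass (alternative algorithm, same result).

-- ===== PORT A =====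
def list_levels_old (levels_dict : List (String × Int)) : List Int :=
  let inv_map : PySem.Dict Int String :=
    levels_dict.foldl (fun d kv => d.insert kv.2 kv.1) PySem.Dict.empty
  let levels : List Int :=
    inv_map.keys.foldl (fun levels key => if key ∈ levels then levels else levels ++ [key]) []
  PySem.List.sorted levels (fun x => x) false

-- ===== PORT B =====
-- loop body: append v unless result is nonempty and its last element equals v
def stepAdj (result : List Int) (v : Int) : List Int :=
  match result.getLast? with
  | none => result ++ [v]
  | some p => if p = v then result else result ++ [v]

def list_levels_old_alt (levels_dict : List (String × Int)) : List Int :=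
  (PySem.List.sorted (levels_dict.map (·.2)) (fun x => x) false).foldl stepAdj []

-- ===== PRECONDITION & SPEC =====
def Spec_list_levels_old (levels_dict : List (String × Int)) (out : List Int) : Prop := out = list_levels_old_alt levels_dict
instance (levels_dict : List (String × Int)) (out : List Int) : Decidable (Spec_list_levels_old levels_dict out) := by unfold Spec_list_levels_old; infer_instance

-- ===== CLAIM =====
def Claim_equal_list_levels_old : Prop := ∀ (levels_dict : List (String × Int)), Dom_list_levels_old levels_dict → Spec_list_levels_old levels_dict (list_levels_old levels_dict)

-- ===== LEMMAS AND PROOFS =====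

theorem mem_stepAdj (x v : Int) (acc : List Int) : x ∈ stepAdj acc v ↔ x ∈ acc ∨ x = v := by
  unfold stepAdj
  cases h : acc.getLast? with
  | none => simp
  | some p =>
    by_cases hpv : p = v
    · have hpmem : p ∈ acc := List.mem_of_getLast? h
      simp only [if_pos hpv]
      constructor
      · exact Or.inl
      · rintro (hx | rfl)
        · exact hx
        · exact hpv ▸ hpmem
    · simp [if_neg hpv]

theorem mem_foldl_stepAdj (x : Int) : ∀ (l acc : List Int), x ∈ l.foldl stepAdj acc ↔ x ∈ acc ∨ x ∈ l
  | [], acc => by simp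
  | v :: l, acc => by
    rw [List.foldl_cons, mem_foldl_stepAdj x l (stepAdj acc v), mem_stepAdj]
    simp
    tauto

theorem le_getLast_of_pairwise_lt (p : Int) : ∀ (acc : List Int), acc.Pairwise (· < ·) →
    acc.getLast? = some p → ∀ a ∈ acc, a ≤ p
  | [], _, h => by simp at h
  | [x], _, h => by
    simp at h
    simp [h]
  | x :: y :: t, hp, h => by
    have h' : (y :: t).getLast? = some p := by
      rwa [List.getLast?_cons_cons] at h
    intro a ha
    rcases List.mem_cons.mp ha with rfl | ha'
    · have hpmem : p ∈ y :: t := List.mem_of_getLast? h'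
      exact le_of_lt (List.rel_of_pairwise_cons hp hpmem)
    · exact le_getLast_of_pairwise_lt p (y :: t) hp.of_cons h' a ha'

theorem pairwise_lt_foldl_stepAdj : ∀ (l acc : List Int), l.Pairwise (· ≤ ·) →
    acc.Pairwise (· < ·) → (∀ a ∈ acc, ∀ b ∈ l, a ≤ b) →
    (l.foldl stepAdj acc).Pairwise (· < ·)
  | [], acc, _, hacc, _ => hacc
  | v :: l, acc, hl, hacc, hbound => by
    rw [List.foldl_cons]
    have hstep_pw : (stepAdj acc v).Pairwise (· < ·) := by
      unfold stepAdj
      cases h : acc.getLast? with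
      | none =>
        have : acc = [] := List.getLast?_eq_none_iff.mp h
        simp [this]
      | some p =>
        dsimp only
        by_cases hpv : p = v
        · simpa [if_pos hpv] using hacc
        · rw [if_neg hpv]
          refine List.pairwise_append.mpr ⟨hacc, by simp, ?_⟩
          intro a ha b hb
          rcases List.mem_singleton.mp hb with rfl
          have hav : a ≤ b := hbound a ha b (by simp)
          rcases lt_or_eq_of_le hav with hlt | heq
          · exact hlt
          · -- a = b; but then a ≤ p ≤ b = a would force p = b
            exfalso
            have hpv' : p ≤ b := hbound p (List.mem_of_getLast? h) b (by simp)
            have hap : a ≤ p := le_getLast_of_pairwise_lt p acc hacc h a ha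
            exact hpv (le_antisymm hpv' (heq ▸ hap))
    have hstep_bound : ∀ a ∈ stepAdj acc v, ∀ b ∈ l, a ≤ b := by
      intro a ha b hb
      rcases (mem_stepAdj a v acc).mp ha with ha' | rfl
      · exact hbound a ha' b (by simp [hb])
      · exact List.rel_of_pairwise_cons hl hb
    exact pairwise_lt_foldl_stepAdj l (stepAdj acc v) hl.of_cons hstep_pw hstep_bound

-- A's append-if-absent loop builds exactly PySem.Set.update of the accumulator
theorem foldl_append_if_eq_update : ∀ (l s : List Int),
    l.foldl (fun acc k => if k ∈ acc then acc else acc ++ [k]) s = PySem.Set.update s l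
  | [], s => rfl
  | k :: l, s => by
    have : (if k ∈ s then s else s ++ [k]) = PySem.Set.add s k := by
      simp [PySem.Set.add, PySem.Set.contains]
    simp only [List.foldl_cons, this, PySem.Set.update, List.foldl_cons] at *
    exact foldl_append_if_eq_update l (PySem.Set.add s k)

-- ===== VERDICT =====
theorem list_levels_old_spec : Claim_equal_list_levels_old := by
  intro levels_dict _
  unfold Spec_list_levels_old list_levels_old list_levels_old_alt
  set vs : List Int := levels_dict.map (·.2) with hvs
  have hkeys : (levels_dict.foldl (fun d kv => d.insert kv.2 kv.1)
      (PySem.Dict.empty : PySem.Dict Int String)).keys = PySem.Set.ofList vs := by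
    have := PySem.Dict.keys_foldl_insert_key (l := levels_dict) (key := fun kv => kv.2)
      (f := fun _ kv => kv.1) (d := (PySem.Dict.empty : PySem.Dict Int String))
    simpa [PySem.Dict.keys_empty, PySem.Set.update, PySem.Set.ofList] using this
  simp only [hkeys, foldl_append_if_eq_update]
  have hlevels : PySem.Set.update ([] : List Int) (PySem.Set.ofList vs)
      = PySem.Set.ofList (PySem.Set.ofList vs) := rfl
  rw [hlevels]
  -- both sides are the strictly increasing rearrangement of the distinct values
  have hsortedvs : (PySem.List.sorted vs (fun x => x) false).Pairwise (· ≤ ·) := by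
    simpa using PySem.List.sorted_pairwise vs (fun x => x)
  have hBlt : ((PySem.List.sorted vs (fun x => x) false).foldl stepAdj []).Pairwise (· < ·) :=
    pairwise_lt_foldl_stepAdj _ [] hsortedvs (by simp) (by simp)
  have hBnodup : ((PySem.List.sorted vs (fun x => x) false).foldl stepAdj []).Nodup :=
    hBlt.imp (fun h => ne_of_lt h)
  have hAnodup : (PySem.Set.ofList (PySem.Set.ofList vs)).Nodup :=
    PySem.Set.nodup_ofList _
  have hperm : ((PySem.List.sorted vs (fun x => x) false).foldl stepAdj []).Perm
      (PySem.Set.ofList (PySem.Set.ofList vs)) := by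
    rw [List.perm_ext_iff_of_nodup hBnodup hAnodup]
    intro a
    rw [mem_foldl_stepAdj, PySem.List.mem_sorted, PySem.Set.mem_ofList, PySem.Set.mem_ofList]
    simp
  exact PySem.List.sorted_eq_of_perm_of_pairwise_lt _ _ _ hperm hBlt
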